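-- pv_equiv track=rewrite | github.com/sorryfornow/ecc_sample | tempG_generation/tree_decrement.py | studyTikcode
-- ===== SOURCE A (Python) =====
-- def studyTikcode(accounts, events):
--     n = len(accounts)
--     for eT,eN,eNew in events:
--         if eT == 1:
--             accounts = [eN if _ < eN else _ for _ in accounts]
--         else:
--             accounts[eN] = eNew
--     return accounts
-- ===== SOURCE B (Python) =====
-- def _clamp(floor, a):
--     return a if floor is None or a >= floor else floor
--
-- def studyTikcode(accounts, events):
--     # One reverse pass: running max of type-1 floors seen so far (from the back)
--     # settles each index at its last set event.
--     n = len(accounts)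
--     floor = None
--     settled = {}
--     for eT, eN, eNew in reversed(events):
--         if eT == 1:
--             if floor is None or eN > floor:
--                 floor = eN
--         else:
--             j = eN if eN >= 0 else eN + n
--             if j not in settled:
--                 settled[j] = _clamp(floor, eNew)
--     return [settled.get(i, _clamp(floor, a)) for i, a in enumerate(accounts)]
-- ===== Notes on version B (the rewrite author's own statement) =====
-- stated objective: alternative
-- what changed: Instead of rewriting the whole list at every type-1 event, B makes one reverse pass over the events keeping the running max of type-1 floors and settling each index at its last set event, then emits each element with one max.
import Mathlib
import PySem

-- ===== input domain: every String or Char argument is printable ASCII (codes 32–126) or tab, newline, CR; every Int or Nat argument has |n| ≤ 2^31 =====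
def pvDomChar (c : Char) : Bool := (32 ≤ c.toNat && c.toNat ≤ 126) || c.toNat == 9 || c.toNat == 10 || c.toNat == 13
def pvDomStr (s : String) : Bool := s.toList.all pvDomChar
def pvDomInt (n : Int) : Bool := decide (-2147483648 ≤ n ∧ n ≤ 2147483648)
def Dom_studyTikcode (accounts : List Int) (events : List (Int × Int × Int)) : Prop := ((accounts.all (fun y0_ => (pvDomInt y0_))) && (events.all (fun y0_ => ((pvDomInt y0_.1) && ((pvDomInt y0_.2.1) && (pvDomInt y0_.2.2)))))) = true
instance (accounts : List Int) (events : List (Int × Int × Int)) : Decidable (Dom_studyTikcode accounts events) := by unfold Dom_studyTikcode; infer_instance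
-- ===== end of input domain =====

-- B replaces A's per-event rewrite of the whole list by one reverse pass over the events
-- (running max of type-1 floors; each index settled at its last set event).
-- A mutates `accounts` in place on type-2 events (until the first type-1 copies it); the
-- equivalence proved here is about the RETURN value only.

-- ===== PORT A =====
def pvStepA (acc : List Int) (e : Int × Int × Int) : List Int :=
  if e.1 = 1 then acc.map (fun x => if x < e.2.1 then e.2.1 else x)
  else PySem.List.pySetD acc e.2.1 e.2.2

def studyTikcode (accounts : List Int) (events : List (Int × Int × Int)) : List Int :=
  events.foldl pvStepA accounts

-- ===== PORT B =====
def pvClamp (floor : Option Int) (a : Int) : Int :=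
  if floor.isNone || floor.any (fun f => a ≥ f) then a else floor.getD a

def pvStepB (n : Int) (st : Option Int × PySem.Dict Int Int) (e : Int × Int × Int) :
    Option Int × PySem.Dict Int Int :=
  if e.1 = 1 then
    (if st.1.isNone || st.1.any (fun f => e.2.1 > f) then some e.2.1 else st.1, st.2)
  else
    let j := if e.2.1 ≥ 0 then e.2.1 else e.2.1 + n
    if st.2.contains j then st
    else (st.1, st.2.insert j (pvClamp st.1 e.2.2))

def studyTikcode_alt (accounts : List Int) (events : List (Int × Int × Int)) : List Int :=
  let n : Int := accounts.length
  let st := events.reverse.foldl (pvStepB n) (none, PySem.Dict.empty)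
  (PySem.List.enumerate accounts).map (fun p => st.2.getD p.1 (pvClamp st.1 p.2))

-- ===== PRECONDITION & SPEC =====
-- Pre_ excludes exactly the inputs where A raises IndexError: a type-2 event whose index
-- is out of range for the accounts list.
def Pre_studyTikcode (accounts : List Int) (events : List (Int × Int × Int)) : Prop :=
  ∀ e ∈ events, e.1 ≠ 1 → PySem.Raise.InRange accounts.length e.2.1

instance (accounts : List Int) (events : List (Int × Int × Int)) : Decidable (Pre_studyTikcode accounts events) := by unfold Pre_studyTikcode; infer_instance

def pvWitness_studyTikcode : List Int × (List (Int × Int × Int)) :=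
  ([3, 1, 4], [(1, 2, 0), (2, 0, 7), (1, 5, 0), (2, -1, 2)])

def Spec_studyTikcode (accounts : List Int) (events : List (Int × Int × Int)) (out : List Int) : Prop := out = studyTikcode_alt accounts events
instance (accounts : List Int) (events : List (Int × Int × Int)) (out : List Int) : Decidable (Spec_studyTikcode accounts events out) := by unfold Spec_studyTikcode; infer_instance

-- ===== CLAIM (what is proved, stated in full; the proofs are below) =====
def Claim_equal_studyTikcode : Prop := ∀ (accounts : List Int) (events : List (Int × Int × Int)), Dom_studyTikcode accounts events → Pre_studyTikcode accounts events → Spec_studyTikcode accounts events (studyTikcode accounts events)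

-- ===== LEMMAS AND PROOFS =====

-- render of a state over an accounts list (the final comprehension of B)
def pvRender (st : Option Int × PySem.Dict Int Int) (acc : List Int) : List Int :=
  (PySem.List.enumerate acc).map (fun p => st.2.getD p.1 (pvClamp st.1 p.2))

theorem pvStepA_length (acc : List Int) (e : Int × Int × Int) :
    (pvStepA acc e).length = acc.length := by
  unfold pvStepA
  split
  · simp
  · simp [PySem.List.length_pySetD]

theorem pvRender_init (acc : List Int) :
    pvRender (none, PySem.Dict.empty) acc = acc := by
  unfold pvRender
  calc (PySem.List.enumerate acc).map
          (fun p => (PySem.Dict.empty (κ := Int) (ν := Int)).getD p.1 (pvClamp none p.2))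
      = (PySem.List.enumerate acc).map (fun p => p.2) := by
        refine List.map_congr_left (fun p _ => ?_)
        simp [PySem.Dict.getD_empty, pvClamp]
    _ = acc := PySem.List.map_snd_enumerate acc 0

-- one-step commutation: applying A's event first then rendering the suffix state
-- equals rendering the state extended by the event
theorem pvStep_comm (n : Int) (acc : List Int) (e : Int × Int × Int)
    (st : Option Int × PySem.Dict Int Int)
    (hn : (acc.length : Int) = n)
    (hIn : e.1 ≠ 1 → PySem.Raise.InRange acc.length e.2.1) :
    pvRender st (pvStepA acc e) = pvRender (pvStepB n st e) acc := by
  obtain ⟨f?, d⟩ := st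
  subst hn
  by_cases h1 : e.1 = 1
  · -- type-1: floor event
    unfold pvRender pvStepA pvStepB
    simp only [h1, if_true]
    apply List.ext_getElem
    · simp [PySem.List.length_enumerate]
    · intro k hk hk'
      simp only [List.length_map, PySem.List.length_enumerate] at hk hk'
      rw [List.getElem_map, List.getElem_map, PySem.List.getElem_enumerate,
        PySem.List.getElem_enumerate, List.getElem_map]
      simp only [zero_add]
      cases hget : d.get? ((k : Nat) : Int) with
      | some v => simp [PySem.Dict.getD_eq_get?_getD, hget]
      | none =>
        simp only [PySem.Dict.getD_eq_get?_getD, hget, Option.getD_none]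
        cases f? <;> simp [pvClamp] <;> split_ifs <;> (try simp) <;> omega
  · -- type-2: point set
    have hIn' := hIn h1
    unfold PySem.Raise.InRange at hIn'
    obtain ⟨hlo, hhi⟩ := hIn'
    unfold pvRender pvStepA pvStepB
    simp only [if_neg h1]
    set j : Int := if e.2.1 ≥ 0 then e.2.1 else e.2.1 + (acc.length : Int) with hj
    have hj0 : 0 ≤ j := by rw [hj]; split_ifs with h <;> omega
    have hjn : j < (acc.length : Int) := by rw [hj]; split_ifs with h <;> omega
    have hidx : PySem.List.pyIdx? acc.length e.2.1 = some j.toNat := by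
      simp only [PySem.List.pyIdx?, hj]
      split_ifs <;> first
        | omega
        | (congr 1 <;> omega)
    have hset : PySem.List.pySetD acc e.2.1 e.2.2 = acc.set j.toNat e.2.2 := by
      simp [PySem.List.pySetD, PySem.List.pySet?, hidx]
    rw [hset]
    by_cases hcont : d.contains j = true
    · -- already settled by a later set event: the dict entry wins on index j
      rw [if_pos hcont]
      obtain ⟨v, hv⟩ : ∃ v, d.get? j = some v := by
        rw [PySem.Dict.contains_eq_isSome_get?] at hcont
        exact Option.isSome_iff_exists.mp hcont
      apply List.ext_getElem
      · simp [PySem.List.length_enumerate]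
      · intro k hk hk'
        simp only [List.length_map, PySem.List.length_enumerate, List.length_set] at hk hk'
        rw [List.getElem_map, List.getElem_map, PySem.List.getElem_enumerate,
          PySem.List.getElem_enumerate]
        simp only [zero_add]
        by_cases hkj : ((k : Nat) : Int) = j
        · have hk2 : k = j.toNat := by omega
          subst hk2
          simp [PySem.Dict.getD_eq_get?_getD, hkj, hv]
        · have hne : j.toNat ≠ k := by omega
          rw [List.getElem_set_ne hne]
    · rw [if_neg hcont]
      have hnone : d.get? j = none := by
        rw [PySem.Dict.contains_eq_isSome_get?] at hcont
        cases h : d.get? j with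
        | none => rfl
        | some v => rw [h] at hcont; simp at hcont
      apply List.ext_getElem
      · simp [PySem.List.length_enumerate]
      · intro k hk hk'
        simp only [List.length_map, PySem.List.length_enumerate, List.length_set] at hk hk'
        rw [List.getElem_map, List.getElem_map, PySem.List.getElem_enumerate,
          PySem.List.getElem_enumerate]
        simp only [zero_add]
        by_cases hkj : ((k : Nat) : Int) = j
        · have hk2 : k = j.toNat := by omega
          subst hk2
          rw [List.getElem_set_self (by simpa using hk)]
          simp [PySem.Dict.getD_eq_get?_getD, hkj, hnone]
        · have hne : j.toNat ≠ k := by omega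
          rw [List.getElem_set_ne hne]
          simp [PySem.Dict.getD_insert, hkj]

theorem pvMain (events : List (Int × Int × Int)) (acc : List Int) (n : Int)
    (hn : (acc.length : Int) = n)
    (hpre : ∀ e ∈ events, e.1 ≠ 1 → PySem.Raise.InRange acc.length e.2.1) :
    events.foldl pvStepA acc
      = pvRender (events.foldr (fun e st => pvStepB n st e) (none, PySem.Dict.empty)) acc := by
  induction events generalizing acc with
  | nil => simpa using (pvRender_init acc).symm
  | cons e es ih =>
    have hlen := pvStepA_length acc e
    have hn' : ((pvStepA acc e).length : Int) = n := by rw [hlen]; exact hn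
    have hpre' : ∀ e' ∈ es, e'.1 ≠ 1 → PySem.Raise.InRange (pvStepA acc e).length e'.2.1 := by
      intro e' he' h1
      rw [hlen]
      exact hpre e' (List.mem_cons_of_mem _ he') h1
    simp only [List.foldl_cons, List.foldr_cons]
    rw [ih (pvStepA acc e) hn' hpre']
    exact pvStep_comm n acc e _ hn (hpre e (List.mem_cons_self) )

-- ===== VERDICT (by name: the statement is the Claim_ definition above) =====
theorem studyTikcode_spec : Claim_equal_studyTikcode := by
  intro accounts events _hdom hpre
  unfold Spec_studyTikcode studyTikcode studyTikcode_alt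
  simp only [List.foldl_reverse]
  have h := pvMain events accounts (accounts.length : Int) rfl hpre
  simpa [pvRender] using h
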